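-- pv_equiv track=rewrite | github.com/dev993848/sediment-palace | start/init_memory.py | _replace_codex_block
-- ===== SOURCE A (Python) =====
-- def _replace_codex_block(original: str, block: str) -> str:
--     lines = original.splitlines()
--     out: list[str] = []
--     i = 0
--     skipping = False
--     while i < len(lines):
--         line = lines[i]
--         stripped = line.strip()
--         if stripped.startswith("[mcp_servers.sediment_palace]"):
--             skipping = True
--             i += 1
--             continue
--         if skipping and stripped.startswith("[") and stripped.endswith("]"):
--             skipping = False
--         if not skipping:
--             out.append(line)
--         i += 1
--
--     text = "\n".join(out).rstrip()
--     if text: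
--         text += "\n\n"
--     text += block.strip() + "\n"
--     return text
-- ===== SOURCE B (Python) =====
-- _TARGET = "[mcp_servers.sediment_palace]"
--
--
-- def _replace_codex_block(original: str, block: str) -> str:
--     # Split lines into groups: a new group starts at any full section header
--     # ("[...]") or at any target-prefixed line; then drop every group whose
--     # first line starts (after strip) with the target header.
--     groups: list[list[str]] = []
--     cur: list[str] = []
--     for line in original.splitlines():
--         s = line.strip()
--         if s.startswith(_TARGET) or (s.startswith("[") and s.endswith("]")):
--             groups.append(cur)
--             cur = [line]
--         else:
--             cur.append(line)
--     groups.append(cur)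
--
--     out = [l for g in groups if not (g and g[0].strip().startswith(_TARGET)) for l in g]
--
--     text = "\n".join(out).rstrip()
--     if text:
--         text += "\n\n"
--     text += block.strip() + "\n"
--     return text
-- ===== Notes on version B (the rewrite author's own statement) =====
-- stated objective: alternative
-- what changed: B replaces A's single stateful scan with a skip flag by a two-phase decomposition: first split the lines into section groups (a new group at every full header or target-prefixed line), then drop the groups whose first line starts with the target header and concatenate the rest, followed by the identical tail formatting.
import Mathlib
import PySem

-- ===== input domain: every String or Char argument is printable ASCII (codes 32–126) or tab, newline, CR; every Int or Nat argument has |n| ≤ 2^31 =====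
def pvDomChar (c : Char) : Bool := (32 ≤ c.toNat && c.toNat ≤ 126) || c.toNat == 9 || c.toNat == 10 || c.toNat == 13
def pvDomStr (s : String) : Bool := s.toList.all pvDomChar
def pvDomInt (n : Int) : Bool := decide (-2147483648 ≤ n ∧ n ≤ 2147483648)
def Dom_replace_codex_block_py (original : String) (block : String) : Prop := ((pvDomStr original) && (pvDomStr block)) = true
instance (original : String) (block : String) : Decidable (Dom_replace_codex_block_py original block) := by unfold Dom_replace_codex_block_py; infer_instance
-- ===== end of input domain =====

-- B re-decomposes A's stateful skip-flag scan into group-splitting + group-filtering; same result, same cost (objective: alternative).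

-- ===== PORT A =====
-- the while loop of A: recursion over the remaining lines with the `skipping` flag
def pvALoop : List String → Bool → List String
  | [], _ => []
  | line :: ls, skipping =>
    let stripped := PySem.Str.strip line
    if PySem.Str.startswith stripped "[mcp_servers.sediment_palace]" then
      pvALoop ls true
    else
      let skipping := if skipping && (PySem.Str.startswith stripped "[" && PySem.Str.endswith stripped "]") then false else skipping
      if !skipping then line :: pvALoop ls skipping else pvALoop ls skipping

def replace_codex_block_py (original : String) (block : String) : String :=
  let lines := PySem.Str.splitlines original
  let out := pvALoop lines false
  let text := PySem.Str.rstrip (PySem.Str.join "\n" out)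
  let text := if text ≠ "" then text ++ "\n\n" else text
  text ++ PySem.Str.strip block ++ "\n"

-- ===== PORT B =====
-- a line that begins a new group: target-prefixed, or a full `[...]` header
def pvBoundary (line : String) : Bool :=
  let s := PySem.Str.strip line
  PySem.Str.startswith s "[mcp_servers.sediment_palace]" ||
    (PySem.Str.startswith s "[" && PySem.Str.endswith s "]")

-- `not (g and g[0].strip().startswith(_TARGET))`
def pvKeep : List String → Bool
  | [] => true
  | l :: _ => !(PySem.Str.startswith (PySem.Str.strip l) "[mcp_servers.sediment_palace]")

-- one step of the grouping loop over `(groups, cur)`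
def pvStep (acc : List (List String) × List String) (line : String) :
    List (List String) × List String :=
  if pvBoundary line then (acc.1 ++ [acc.2], [line]) else (acc.1, acc.2 ++ [line])

def replace_codex_block_py_alt (original : String) (block : String) : String :=
  let p := (PySem.Str.splitlines original).foldl pvStep ([], [])
  let groups := p.1 ++ [p.2]
  let out := (groups.filter pvKeep).flatten
  let text := PySem.Str.rstrip (PySem.Str.join "\n" out)
  let text := if text ≠ "" then text ++ "\n\n" else text
  text ++ PySem.Str.strip block ++ "\n"

-- ===== PRECONDITION & SPEC =====
def Spec_replace_codex_block_py (original : String) (block : String) (out : String) : Prop := out = replace_codex_block_py_alt original block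
instance (original : String) (block : String) (out : String) : Decidable (Spec_replace_codex_block_py original block out) := by unfold Spec_replace_codex_block_py; infer_instance

-- ===== CLAIM (what is proved, stated in full; the proofs are below) =====
def Claim_equal_replace_codex_block_py : Prop := ∀ (original : String) (block : String), Dom_replace_codex_block_py original block → Spec_replace_codex_block_py original block (replace_codex_block_py original block)

-- ===== LEMMAS AND PROOFS =====

-- unfoldings of A's loop, one per branch shape
lemma pvALoop_target (l : String) (ls : List String) (b : Bool)
    (ht : PySem.Str.startswith (PySem.Str.strip l) "[mcp_servers.sediment_palace]" = true) :
    pvALoop (l :: ls) b = pvALoop ls true := by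
  simp only [pvALoop, ht, if_true]

lemma pvALoop_header (l : String) (ls : List String) (b : Bool)
    (ht : PySem.Str.startswith (PySem.Str.strip l) "[mcp_servers.sediment_palace]" = false)
    (hfull : (PySem.Str.startswith (PySem.Str.strip l) "[" && PySem.Str.endswith (PySem.Str.strip l) "]") = true) :
    pvALoop (l :: ls) b = l :: pvALoop ls false := by
  cases b <;> simp only [pvALoop, ht, hfull] <;> simp

lemma pvALoop_plain (l : String) (ls : List String) (b : Bool)
    (ht : PySem.Str.startswith (PySem.Str.strip l) "[mcp_servers.sediment_palace]" = false)
    (hfull : (PySem.Str.startswith (PySem.Str.strip l) "[" && PySem.Str.endswith (PySem.Str.strip l) "]") = false) :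
    pvALoop (l :: ls) b = if !b then l :: pvALoop ls b else pvALoop ls b := by
  cases b <;> simp only [pvALoop, ht, hfull] <;> simp

-- keep-status of a fresh one-line group
lemma pvKeep_single (l : String) :
    pvKeep [l] = !(PySem.Str.startswith (PySem.Str.strip l) "[mcp_servers.sediment_palace]") := by
  simp only [pvKeep]

-- appending a non-boundary line to the current group does not change whether it is kept
lemma pvKeep_append (cur : List String) (l : String) (h : pvBoundary l = false) :
    pvKeep (cur ++ [l]) = pvKeep cur := by
  cases cur with
  | nil =>
    simp only [List.nil_append, pvKeep]
    unfold pvBoundary at h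
    simp only [Bool.or_eq_false_iff] at h
    rw [h.1]
    rfl
  | cons a t => simp only [List.cons_append, pvKeep]

-- flatten-filter distributes over snoc
lemma pv_snoc (gs : List (List String)) (c : List String) :
    ((gs ++ [c]).filter pvKeep).flatten
      = (gs.filter pvKeep).flatten ++ (if pvKeep c then c else []) := by
  cases hk : pvKeep c <;> simp [List.filter_append, hk]

-- the invariant: flatten-filter of the grouping loop from state (gs, cur) equals
-- what is already decided plus A's loop on the remaining lines with flag = ¬(cur kept)
lemma pv_main (lines : List String) (gs : List (List String)) (cur : List String) :
    (((lines.foldl pvStep (gs, cur)).1 ++ [(lines.foldl pvStep (gs, cur)).2]).filter pvKeep).flatten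
      = ((gs.filter pvKeep).flatten ++ (if pvKeep cur then cur else []))
        ++ pvALoop lines (!pvKeep cur) := by
  induction lines generalizing gs cur with
  | nil =>
    rw [List.foldl_nil, pv_snoc]
    simp [pvALoop]
  | cons l ls ih =>
    cases hb : pvBoundary l with
    | true =>
      have hstep : pvStep (gs, cur) l = (gs ++ [cur], [l]) := by
        simp only [pvStep, hb, if_true]
      rw [List.foldl_cons, hstep, ih, pv_snoc, pvKeep_single]
      cases ht : PySem.Str.startswith (PySem.Str.strip l) "[mcp_servers.sediment_palace]" with
      | true => rw [pvALoop_target l ls _ ht]; simp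
      | false =>
        have hfull : (PySem.Str.startswith (PySem.Str.strip l) "[" &&
            PySem.Str.endswith (PySem.Str.strip l) "]") = true := by
          unfold pvBoundary at hb
          simp only [Bool.or_eq_true_iff, ht] at hb
          exact hb.resolve_left (by simp)
        rw [pvALoop_header l ls _ ht hfull]
        simp
    | false =>
      have hstep : pvStep (gs, cur) l = (gs, cur ++ [l]) := by
        simp only [pvStep, hb, if_false, Bool.false_eq_true]
      have ht : PySem.Str.startswith (PySem.Str.strip l) "[mcp_servers.sediment_palace]" = false := by
        unfold pvBoundary at hb
        simp only [Bool.or_eq_false_iff] at hb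
        exact hb.1
      have hfull : (PySem.Str.startswith (PySem.Str.strip l) "[" &&
          PySem.Str.endswith (PySem.Str.strip l) "]") = false := by
        unfold pvBoundary at hb
        simp only [Bool.or_eq_false_iff] at hb
        exact hb.2
      rw [List.foldl_cons, hstep, ih, pvKeep_append cur l hb, pvALoop_plain l ls _ ht hfull]
      cases hk : pvKeep cur <;> simp

-- the two `out` lists coincide
lemma pv_out_eq (lines : List String) :
    ((((lines.foldl pvStep (([] : List (List String)), ([] : List String))).1
        ++ [(lines.foldl pvStep (([] : List (List String)), ([] : List String))).2]).filter pvKeep).flatten)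
      = pvALoop lines false := by
  have h := pv_main lines [] []
  simpa [pvKeep] using h

-- ===== VERDICT (by name: the statement is the Claim_ definition above) =====
theorem replace_codex_block_py_spec : Claim_equal_replace_codex_block_py := by
  intro original block _
  simp only [Spec_replace_codex_block_py, replace_codex_block_py, replace_codex_block_py_alt,
    pv_out_eq]
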